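-- pv_equiv track=rewrite | github.com/RatanPrakash/CP | B_Progressive_Square.py | progressive_square
-- ===== SOURCE A (Python) =====
-- def progressive_square(n, c, d, a_11):
--     # Initialize the matrix with zeros
--     square = [[0] * n for _ in range(n)]
--
--     # Set the value of a_11
--     square[0][0] = a_11
--
--     # Fill the first row
--     for j in range(1, n):
--         square[0][j] = square[0][j-1] + c
--
--     # Fill the first column
--     for i in range(1, n):
--         square[i][0] = square[i-1][0] + d
--
--     # Fill the rest of the matrix
--     for i in range(1, n):
--         for j in range(1, n):
--             square[i][j] = square[i-1][j] + d
--
--     return square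
-- ===== SOURCE B (Python) =====
-- def progressive_square(n, c, d, a_11):
--     # Each cell has the closed form a_11 + i*d + j*c: no propagation passes.
--     return [[a_11 + i * d + j * c for j in range(n)] for i in range(n)]
-- ===== Notes on version B (the rewrite author's own statement) =====
-- stated objective: simpler
-- what changed: Replaces the three accumulation passes (first row, first column, then row-by-row propagation) by a single nested comprehension computing each cell from its closed form a_11 + i*d + j*c.
import Mathlib
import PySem

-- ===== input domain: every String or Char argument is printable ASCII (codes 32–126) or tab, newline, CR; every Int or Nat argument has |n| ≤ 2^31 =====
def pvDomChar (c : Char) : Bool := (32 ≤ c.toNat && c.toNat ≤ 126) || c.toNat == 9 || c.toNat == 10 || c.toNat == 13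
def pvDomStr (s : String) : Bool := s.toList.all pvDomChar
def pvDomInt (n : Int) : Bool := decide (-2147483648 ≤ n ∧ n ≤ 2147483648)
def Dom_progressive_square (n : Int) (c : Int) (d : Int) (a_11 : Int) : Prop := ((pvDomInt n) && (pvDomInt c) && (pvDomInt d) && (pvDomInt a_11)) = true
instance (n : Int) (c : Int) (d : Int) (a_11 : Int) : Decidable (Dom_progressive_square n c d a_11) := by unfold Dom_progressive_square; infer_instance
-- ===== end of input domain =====

-- B replaces A's three accumulation passes by one nested comprehension with the
-- closed form a_11 + i*d + j*c per cell (objective: simpler).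

-- ===== PORT A =====
-- Python read 'square[i][j]': exact for the nonnegative in-range indices A uses
-- under Pre_ (for n ≤ 0 the Python raises IndexError; excluded by Pre_).
def pvGet2 (m : List (List Int)) (i j : Int) : Int :=
  ((m[i.toNat]?.getD [])[j.toNat]?).getD 0

-- Python write 'square[i][j] = v': exact for the same in-range indices.
def pvSet2 (m : List (List Int)) (i j : Int) (v : Int) : List (List Int) :=
  m.set i.toNat ((m[i.toNat]?.getD []).set j.toNat v)

def progressive_square (n : Int) (c : Int) (d : Int) (a_11 : Int) : List (List Int) :=
  -- square = [[0] * n for _ in range(n)]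
  let square := (PySem.List.pyRange 0 n 1).map (fun _ => List.replicate n.toNat 0)
  -- square[0][0] = a_11
  let square := pvSet2 square 0 0 a_11
  -- for j in range(1, n): square[0][j] = square[0][j-1] + c
  let square := (PySem.List.pyRange 1 n 1).foldl
      (fun sq j => pvSet2 sq 0 j (pvGet2 sq 0 (j - 1) + c)) square
  -- for i in range(1, n): square[i][0] = square[i-1][0] + d
  let square := (PySem.List.pyRange 1 n 1).foldl
      (fun sq i => pvSet2 sq i 0 (pvGet2 sq (i - 1) 0 + d)) square
  -- for i in range(1, n): for j in range(1, n): square[i][j] = square[i-1][j] + d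
  let square := (PySem.List.pyRange 1 n 1).foldl
      (fun sq i => (PySem.List.pyRange 1 n 1).foldl
          (fun sq j => pvSet2 sq i j (pvGet2 sq (i - 1) j + d)) sq) square
  square

-- ===== PORT B =====
def progressive_square_alt (n : Int) (c : Int) (d : Int) (a_11 : Int) : List (List Int) :=
  (PySem.List.pyRange 0 n 1).map (fun i =>
    (PySem.List.pyRange 0 n 1).map (fun j => a_11 + i * d + j * c))

-- ===== PRECONDITION & SPEC =====
-- Pre_ excludes exactly n ≤ 0, where A raises IndexError (square[0][0] on []).
def Pre_progressive_square (n : Int) (c : Int) (d : Int) (a_11 : Int) : Prop := 1 ≤ n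
instance (n : Int) (c : Int) (d : Int) (a_11 : Int) : Decidable (Pre_progressive_square n c d a_11) := by unfold Pre_progressive_square; infer_instance
def pvWitness_progressive_square : Int × Int × Int × Int := (3, 2, 10, 1)


def Spec_progressive_square (n : Int) (c : Int) (d : Int) (a_11 : Int) (out : List (List Int)) : Prop := out = progressive_square_alt n c d a_11
instance (n : Int) (c : Int) (d : Int) (a_11 : Int) (out : List (List Int)) : Decidable (Spec_progressive_square n c d a_11 out) := by unfold Spec_progressive_square; infer_instance

-- ===== CLAIM (what is proved, stated in full; the proofs are below) =====
def Claim_equal_progressive_square : Prop := ∀ (n : Int) (c : Int) (d : Int) (a_11 : Int), Dom_progressive_square n c d a_11 → Pre_progressive_square n c d a_11 → Spec_progressive_square n c d a_11 (progressive_square n c d a_11)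

-- ===== LEMMAS AND PROOFS =====

-- The N×N matrix whose (i,j) entry is V i j.
def pvTab (N : Nat) (V : Nat → Nat → Int) : List (List Int) :=
  (List.range N).map (fun i => (List.range N).map (V i))

theorem map_range_set {α : Type} (N : Nat) (f : Nat → α) (k : Nat) (v : α) :
    ((List.range N).map f).set k v
      = (List.range N).map (fun j => if j = k then v else f j) := by
  apply List.ext_getElem
  · simp
  · intro i h1 h2
    simp only [List.getElem_set, List.getElem_map, List.getElem_range]
    simp only [List.length_set, List.length_map, List.length_range] at h1
    by_cases h : i = k
    · simp [h]
    · simp only [if_neg h]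
      rw [if_neg (fun hk => h hk.symm)]

theorem tab_get' (N : Nat) (V : Nat → Nat → Int) (i j : Int)
    (hi : i.toNat < N) (hj : j.toNat < N) :
    pvGet2 (pvTab N V) i j = V i.toNat j.toNat := by
  simp [pvGet2, pvTab, hi, hj]

theorem tab_set' (N : Nat) (V : Nat → Nat → Int) (i j : Int) (v : Int) (hi : i.toNat < N) :
    pvSet2 (pvTab N V) i j v
      = pvTab N (fun i' j' => if i' = i.toNat ∧ j' = j.toNat then v else V i' j') := by
  unfold pvSet2 pvTab
  have hrow : ((List.range N).map (fun i => (List.range N).map (V i)))[i.toNat]?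
      = some ((List.range N).map (V i.toNat)) := by
    simp [hi]
  rw [hrow]
  simp only [Option.getD_some]
  rw [map_range_set N (V i.toNat) j.toNat v, map_range_set N _ i.toNat _]
  apply List.map_congr_left
  intro i' _
  by_cases h : i' = i.toNat
  · subst h
    simp only [if_pos rfl]
    apply List.map_congr_left
    intro j' _
    by_cases hjj : j' = j.toNat <;> simp [hjj]
  · simp only [if_neg h]
    apply List.map_congr_left
    intro j' _
    simp [h]

theorem tab_congr (N : Nat) (V W : Nat → Nat → Int)
    (h : ∀ i, i < N → ∀ j, j < N → V i j = W i j) : pvTab N V = pvTab N W := by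
  unfold pvTab
  apply List.map_congr_left
  intro i hi
  rw [List.mem_range] at hi
  apply List.map_congr_left
  intro j hj
  rw [List.mem_range] at hj
  exact h i hi j hj

theorem init_eq (n : Int) :
    (PySem.List.pyRange 0 n 1).map (fun _ => List.replicate n.toNat 0)
      = pvTab n.toNat (fun _ _ => 0) := by
  rw [PySem.List.pyRange_one]
  simp [pvTab, List.map_map, Function.comp_def, List.map_const']

theorem init1 (n : Int) (a_11 : Int) (hN : 1 ≤ n.toNat) :
    pvSet2 (pvTab n.toNat (fun _ _ => 0)) 0 0 a_11
      = pvTab n.toNat (fun i j => if i = 0 ∧ j = 0 then a_11 else 0) := by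
  rw [tab_set' n.toNat _ 0 0 a_11 (by omega)]
  apply tab_congr
  intro i _ j _
  simp

theorem phase2 (c a_11 : Int) (N : Nat) (hN : 1 ≤ N) :
    ∀ K, K ≤ N - 1 →
    ((List.range K).map (fun k : Nat => 1 + (k : Int))).foldl
        (fun sq j => pvSet2 sq 0 j (pvGet2 sq 0 (j - 1) + c))
        (pvTab N (fun i j => if i = 0 ∧ j = 0 then a_11 else 0))
      = pvTab N (fun i j => if i = 0 ∧ j ≤ K then a_11 + j * c else 0) := by
  intro K
  induction K with
  | zero =>
    intro _
    simp only [List.range_zero, List.map_nil, List.foldl_nil]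
    apply tab_congr
    intro i _ j _
    by_cases h : i = 0 ∧ j = 0
    · obtain ⟨h1, h2⟩ := h; simp [h1, h2]
    · have : ¬ (i = 0 ∧ j ≤ 0) := by omega
      simp [h, this]
  | succ K ih =>
    intro hK
    rw [List.range_succ, List.map_append, List.foldl_append, ih (by omega)]
    simp only [List.map_cons, List.map_nil, List.foldl_cons, List.foldl_nil]
    have e1 : ((1:Int) + ↑K - 1) = ((K : Nat) : Int) := by push_cast; ring
    have e2 : ((1:Int) + ↑K) = ((K + 1 : Nat) : Int) := by push_cast; ring
    rw [e1, e2]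
    have ev : pvGet2 (pvTab N fun i j => if i = 0 ∧ j ≤ K then a_11 + ↑j * c else 0)
        0 ((K : Nat) : Int) + c = a_11 + ((K + 1 : Nat) : Int) * c := by
      rw [tab_get' N _ 0 ↑K (by omega) (by omega),
        if_pos (show (0:Int).toNat = 0 ∧ ((K:Nat):Int).toNat ≤ K by omega)]
      simp only [Int.toNat_natCast]
      push_cast; ring
    rw [ev, tab_set' N _ 0 ↑(K + 1) _ (by omega)]
    apply tab_congr
    intro i _ j _
    simp only [Int.toNat_zero, Int.toNat_natCast]
    by_cases h : i = 0 ∧ j = K + 1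
    · have h3 : i = 0 ∧ j ≤ K + 1 := by omega
      simp [h, h3]
    · by_cases h2 : i = 0 ∧ j ≤ K
      · have h3 : i = 0 ∧ j ≤ K + 1 := by omega
        simp [h, h2, h3]
        omega
      · have h3 : ¬ (i = 0 ∧ j ≤ K + 1) := by omega
        simp [h, h2, h3]

theorem phase3 (c d a_11 : Int) (N : Nat) (hN : 1 ≤ N) :
    ∀ K, K ≤ N - 1 →
    ((List.range K).map (fun k : Nat => 1 + (k : Int))).foldl
        (fun sq i => pvSet2 sq i 0 (pvGet2 sq (i - 1) 0 + d))
        (pvTab N (fun i j => if i = 0 then a_11 + j * c else 0))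
      = pvTab N (fun i j =>
          if i = 0 then a_11 + j * c
          else if j = 0 ∧ i ≤ K then a_11 + i * d else 0) := by
  intro K
  induction K with
  | zero =>
    intro _
    simp only [List.range_zero, List.map_nil, List.foldl_nil]
    apply tab_congr
    intro i _ j _
    by_cases h : i = 0
    · simp [h]
    · have : ¬ (j = 0 ∧ i ≤ 0) := by omega
      simp [h, this]
  | succ K ih =>
    intro hK
    rw [List.range_succ, List.map_append, List.foldl_append, ih (by omega)]
    simp only [List.map_cons, List.map_nil, List.foldl_cons, List.foldl_nil]
    have e1 : ((1:Int) + ↑K - 1) = ((K : Nat) : Int) := by push_cast; ring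
    have e2 : ((1:Int) + ↑K) = ((K + 1 : Nat) : Int) := by push_cast; ring
    rw [e1, e2]
    have ev : pvGet2 (pvTab N fun i j =>
          if i = 0 then a_11 + ↑j * c else if j = 0 ∧ i ≤ K then a_11 + ↑i * d else 0)
        ((K : Nat) : Int) 0 + d = a_11 + ((K + 1 : Nat) : Int) * d := by
      rw [tab_get' N _ ↑K 0 (by omega) (by omega)]
      by_cases h : K = 0
      · subst h
        rw [if_pos (show ((0:Nat):Int).toNat = 0 by omega)]
        push_cast
        ring_nf
      · rw [if_neg (show ¬ ((K:Nat):Int).toNat = 0 by omega),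
          if_pos (show (0:Int).toNat = 0 ∧ ((K:Nat):Int).toNat ≤ K by omega)]
        simp only [Int.toNat_natCast]
        push_cast; ring
    rw [ev, tab_set' N _ ↑(K + 1) 0 _ (by omega)]
    apply tab_congr
    intro i _ j _
    simp only [Int.toNat_zero, Int.toNat_natCast]
    by_cases h : i = K + 1 ∧ j = 0
    · obtain ⟨h1, h2⟩ := h
      have hi0 : ¬ (i = 0) := by omega
      simp [h1, h2, hi0]
    · by_cases h0 : i = 0
      · simp [h0, h]
      · by_cases h2 : j = 0 ∧ i ≤ K
        · have h3 : j = 0 ∧ i ≤ K + 1 := by omega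
          simp [h, h0, h2, h3]
          omega
        · have h3 : ¬ (j = 0 ∧ i ≤ K + 1) := by omega
          simp [h, h0, h2, h3]

-- the matrix contents after the first-row and first-column passes
def pvV3 (c d a_11 : Int) (i j : Nat) : Int :=
  if j = 0 then a_11 + i * d else if i = 0 then a_11 + j * c else 0

theorem phase4_inner (c d a_11 : Int) (N : Nat) (i : Nat) (hi1 : 1 ≤ i) (hiN : i < N)
    (W : Nat → Nat → Int)
    (hprev : ∀ j, j < N → W (i - 1) j = a_11 + ((i - 1 : Nat) : Int) * d + j * c)
    (hrow0 : W i 0 = a_11 + i * d) :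
    ∀ K, K ≤ N - 1 →
    ((List.range K).map (fun k : Nat => 1 + (k : Int))).foldl
        (fun sq j => pvSet2 sq (↑i) j (pvGet2 sq ((↑i : Int) - 1) j + d)) (pvTab N W)
      = pvTab N (fun i' j =>
          if i' = i ∧ j ≤ K then a_11 + i * d + j * c else W i' j) := by
  intro K
  induction K with
  | zero =>
    intro _
    simp only [List.range_zero, List.map_nil, List.foldl_nil]
    apply tab_congr
    intro i' _ j _
    by_cases h : i' = i ∧ j ≤ 0
    · obtain ⟨h1, h2⟩ := h
      have hj : j = 0 := by omega
      simp [h1, hj, hrow0]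
    · simp only [if_neg h]
  | succ K ih =>
    intro hK
    rw [List.range_succ, List.map_append, List.foldl_append, ih (by omega)]
    simp only [List.map_cons, List.map_nil, List.foldl_cons, List.foldl_nil]
    have e1 : ((i : Int) - 1) = ((i - 1 : Nat) : Int) := by omega
    have e2 : ((1:Int) + ↑K) = ((K + 1 : Nat) : Int) := by push_cast; ring
    rw [e1, e2]
    have ev : pvGet2 (pvTab N fun i' j =>
          if i' = i ∧ j ≤ K then a_11 + ↑i * d + ↑j * c else W i' j)
        ((i - 1 : Nat) : Int) ((K + 1 : Nat) : Int) + d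
        = a_11 + (i : Int) * d + ((K + 1 : Nat) : Int) * c := by
      rw [tab_get' N _ ↑(i - 1) ↑(K + 1) (by omega) (by omega)]
      simp only [Int.toNat_natCast]
      rw [if_neg (by omega), hprev (K + 1) (by omega)]
      have hc : ((i - 1 : Nat) : Int) = (i : Int) - 1 := by omega
      rw [hc]; ring
    rw [ev, tab_set' N _ ↑i ↑(K + 1) _ (by omega)]
    apply tab_congr
    intro i' _ j _
    simp only [Int.toNat_natCast]
    by_cases h : i' = i ∧ j = K + 1
    · have h3 : i' = i ∧ j ≤ K + 1 := by omega
      simp [h, h3]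
    · by_cases h2 : i' = i ∧ j ≤ K
      · have h3 : i' = i ∧ j ≤ K + 1 := by omega
        simp [h, h2, h3]
        omega
      · have h3 : ¬ (i' = i ∧ j ≤ K + 1) := by omega
        simp [h, h2, h3]

theorem phase4 (c d a_11 : Int) (N : Nat) (hN : 1 ≤ N) :
    ∀ K, K ≤ N - 1 →
    ((List.range K).map (fun k : Nat => 1 + (k : Int))).foldl
        (fun sq i => ((List.range (N - 1)).map (fun k : Nat => 1 + (k : Int))).foldl
            (fun sq j => pvSet2 sq i j (pvGet2 sq (i - 1) j + d)) sq)
        (pvTab N (pvV3 c d a_11))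
      = pvTab N (fun i j =>
          if i ≤ K then a_11 + i * d + j * c else pvV3 c d a_11 i j) := by
  intro K
  induction K with
  | zero =>
    intro _
    simp only [List.range_zero, List.map_nil, List.foldl_nil]
    apply tab_congr
    intro i _ j _
    by_cases h : i ≤ 0
    · have hi : i = 0 := by omega
      subst hi
      by_cases hj : j = 0 <;> simp [pvV3, hj]
    · simp [h]
  | succ K ih =>
    intro hK
    rw [List.range_succ, List.map_append, List.foldl_append, ih (by omega)]
    simp only [List.map_cons, List.map_nil, List.foldl_cons, List.foldl_nil]
    have e2 : ((1:Int) + ↑K) = ((K + 1 : Nat) : Int) := by push_cast; ring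
    rw [e2, phase4_inner c d a_11 N (K + 1) (by omega) (by omega) _
          (by
            intro j hj
            simp only [Nat.add_sub_cancel]
            rw [if_pos (by omega)])
          (by
            rw [if_neg (by omega)]
            simp [pvV3])
          (N - 1) (le_refl _)]
    apply tab_congr
    intro i _ j hj
    by_cases h : i = K + 1
    · have h2 : i ≤ K + 1 := by omega
      simp [h, if_pos (And.intro rfl (by omega : j ≤ N - 1)), h2]
      intro hjj
      exact absurd hjj (by omega)
    · by_cases h2 : i ≤ K
      · have h3 : i ≤ K + 1 := by omega
        simp [h, h2, h3]
      · have h3 : ¬ (i ≤ K + 1) := by omega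
        simp [h, h2, h3]

theorem alt_eq (n c d a_11 : Int) :
    progressive_square_alt n c d a_11
      = pvTab n.toNat (fun i j => a_11 + (i : Int) * d + (j : Int) * c) := by
  unfold progressive_square_alt pvTab
  rw [PySem.List.pyRange_one]
  simp [List.map_map, Function.comp_def]

theorem range1_eq (n : Int) (h : 1 ≤ n) :
    PySem.List.pyRange 1 n 1
      = (List.range (n.toNat - 1)).map (fun k : Nat => 1 + (k : Int)) := by
  rw [PySem.List.pyRange_one]
  have h1 : (n - 1).toNat = n.toNat - 1 := by omega
  rw [h1]

theorem main_eq (n c d a_11 : Int) (hn : 1 ≤ n) :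
    progressive_square n c d a_11 = progressive_square_alt n c d a_11 := by
  have hN : 1 ≤ n.toNat := by omega
  have hdef : progressive_square n c d a_11
      = (PySem.List.pyRange 1 n 1).foldl
          (fun sq i => (PySem.List.pyRange 1 n 1).foldl
              (fun sq j => pvSet2 sq i j (pvGet2 sq (i - 1) j + d)) sq)
          ((PySem.List.pyRange 1 n 1).foldl
            (fun sq i => pvSet2 sq i 0 (pvGet2 sq (i - 1) 0 + d))
            ((PySem.List.pyRange 1 n 1).foldl
              (fun sq j => pvSet2 sq 0 j (pvGet2 sq 0 (j - 1) + c))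
              (pvSet2 ((PySem.List.pyRange 0 n 1).map (fun _ => List.replicate n.toNat 0)) 0 0 a_11))) := rfl
  rw [hdef, init_eq, init1 n a_11 hN, range1_eq n hn,
      phase2 c a_11 n.toNat hN (n.toNat - 1) (le_refl _)]
  have hV2 : pvTab n.toNat (fun i j => if i = 0 ∧ j ≤ n.toNat - 1 then a_11 + j * c else 0)
      = pvTab n.toNat (fun i j => if i = 0 then a_11 + j * c else 0) := by
    apply tab_congr
    intro i _ j hj
    by_cases h : i = 0
    · simp [h, (by omega : j ≤ n.toNat - 1)]
    · simp [h]
  rw [hV2, phase3 c d a_11 n.toNat hN (n.toNat - 1) (le_refl _)]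
  have hV3 : pvTab n.toNat (fun i j =>
        if i = 0 then a_11 + j * c else if j = 0 ∧ i ≤ n.toNat - 1 then a_11 + i * d else 0)
      = pvTab n.toNat (pvV3 c d a_11) := by
    apply tab_congr
    intro i hi j _
    unfold pvV3
    by_cases h : i = 0
    · by_cases hj : j = 0 <;> simp [h, hj]
    · by_cases hj : j = 0
      · simp [h, hj, (by omega : i ≤ n.toNat - 1)]
      · simp [h, hj]
  rw [hV3, phase4 c d a_11 n.toNat hN (n.toNat - 1) (le_refl _), alt_eq]
  apply tab_congr
  intro i hi j _
  rw [if_pos (by omega : i ≤ n.toNat - 1)]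

-- ===== VERDICT (by name: the statement is the Claim_ definition above) =====
theorem progressive_square_spec : Claim_equal_progressive_square := by
  intro n c d a_11 _ hpre
  unfold Spec_progressive_square
  exact main_eq n c d a_11 hpre
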